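-- pv_equiv track=rewrite | github.com/NDST-ICT/SocialMediaComputing | sg/StaticGreedyCELF_undirected_WIC.py | R_first_v
-- ===== SOURCE A (Python) =====
-- def R_first_v(adj, v):
--     temp = set({v})
--     s_temp = set({v})
--     while s_temp:
--         a = set()
--         for i in s_temp:
--             if not(i in adj):
--                 continue
--             for j in adj[i]:
--                 if not(j in temp):
--                     temp.add(j)
--                     a.add(j)
--         s_temp = a
--     return len(temp)
-- ===== SOURCE B (Python) =====
-- def R_first_v(adj, v):
--     visited = {v}
--     stack = [v]
--     while stack:
--         i = stack.pop()
--         if i not in adj: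
--             continue
--         for j in adj[i]:
--             if j not in visited:
--                 visited.add(j)
--                 stack.append(j)
--     return len(visited)
-- ===== Notes on version B (the rewrite author's own statement) =====
-- stated objective: alternative
-- what changed: Replaces the level-synchronous BFS (a whole frontier set expanded per while-iteration into a fresh set `a`) by an iterative DFS that pops one node per iteration from an explicit stack and pushes newly visited neighbors.
import Mathlib
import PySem

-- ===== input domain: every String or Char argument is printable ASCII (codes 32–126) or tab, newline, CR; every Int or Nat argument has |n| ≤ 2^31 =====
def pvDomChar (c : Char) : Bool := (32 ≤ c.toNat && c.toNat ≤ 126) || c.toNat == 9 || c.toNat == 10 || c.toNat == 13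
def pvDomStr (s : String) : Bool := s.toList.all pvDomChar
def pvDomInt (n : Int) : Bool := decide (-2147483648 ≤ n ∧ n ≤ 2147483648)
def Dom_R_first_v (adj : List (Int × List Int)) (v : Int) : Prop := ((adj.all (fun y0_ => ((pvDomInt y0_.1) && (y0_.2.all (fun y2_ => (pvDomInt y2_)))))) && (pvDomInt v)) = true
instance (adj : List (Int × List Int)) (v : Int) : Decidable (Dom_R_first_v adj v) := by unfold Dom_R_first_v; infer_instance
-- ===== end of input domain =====

-- B replaces A's level-synchronous frontier-set BFS by an iterative stack-based DFS
-- (one node popped per iteration); both count the reachable set, same asymptotic cost.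

-- Both loops terminate because the visited set grows inside the finite universe
-- v :: all neighbour lists; the fuel below is an upper bound on the number of
-- iterations, proved sufficient in the lemmas (a totality device, not an algorithm change).
def pvFuel (adj : List (Int × List Int)) (v : Int) : Nat :=
  (v :: (adj.map Prod.snd).flatten).length + 1

-- ===== PORT A =====
-- one while-iteration of A: expand the whole frontier s_temp, returning (temp, a)
def pvStepA (adj : List (Int × List Int)) (temp s_temp : PySem.Set Int) :
    PySem.Set Int × PySem.Set Int :=
  s_temp.foldl (fun st i =>
    match (PySem.Dict.mk adj).get? i with
    | none => st                      -- if not (i in adj): continue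
    | some ns =>
        ns.foldl (fun st j =>
          if j ∈ st.1 then st         -- if not (j in temp):
          else (PySem.Set.add st.1 j, PySem.Set.add st.2 j)) st)
    (temp, PySem.Set.empty)

def pvLoopA (adj : List (Int × List Int)) : Nat → PySem.Set Int → PySem.Set Int → PySem.Set Int
  | 0, temp, _ => temp
  | fuel + 1, temp, s_temp =>
    if s_temp.isEmpty then temp       -- while s_temp:
    else
      let st := pvStepA adj temp s_temp
      pvLoopA adj fuel st.1 st.2

def R_first_v (adj : List (Int × List Int)) (v : Int) : Int :=
  ((pvLoopA adj (pvFuel adj v) (PySem.Set.ofList [v]) (PySem.Set.ofList [v])).length : Int)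

-- ===== PORT B =====
def pvLoopB (adj : List (Int × List Int)) : Nat → PySem.Set Int → List Int → PySem.Set Int
  | 0, visited, _ => visited
  | _ + 1, visited, [] => visited     -- while stack:
  | fuel + 1, visited, i :: stack =>  -- i = stack.pop()  (stack top = list head)
    match (PySem.Dict.mk adj).get? i with
    | none => pvLoopB adj fuel visited stack   -- if i not in adj: continue
    | some ns =>
        let st := ns.foldl (fun (st : PySem.Set Int × List Int) j =>
          if j ∈ st.1 then st         -- if j not in visited:
          else (PySem.Set.add st.1 j, j :: st.2)) (visited, stack)
        pvLoopB adj fuel st.1 st.2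

def R_first_v_alt (adj : List (Int × List Int)) (v : Int) : Int :=
  ((pvLoopB adj (pvFuel adj v) (PySem.Set.ofList [v]) [v]).length : Int)

-- ===== PRECONDITION & SPEC =====
def Spec_R_first_v (adj : List (Int × List Int)) (v : Int) (out : Int) : Prop := out = R_first_v_alt adj v
instance (adj : List (Int × List Int)) (v : Int) (out : Int) : Decidable (Spec_R_first_v adj v out) := by unfold Spec_R_first_v; infer_instance

-- ===== CLAIM (what is proved, stated in full; the proofs are below) =====
def Claim_equal_R_first_v : Prop := ∀ (adj : List (Int × List Int)) (v : Int), Dom_R_first_v adj v → Spec_R_first_v adj v (R_first_v adj v)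

-- ===== LEMMAS AND PROOFS =====

-- the universe: every node either is v or occurs in some neighbour list
def pvU (adj : List (Int × List Int)) (v : Int) : List Int :=
  v :: (adj.map Prod.snd).flatten

-- reachability from v along adj
inductive pvReach (adj : List (Int × List Int)) (v : Int) : Int → Prop
  | refl : pvReach adj v v
  | step {i j : Int} {ns : List Int} :
      pvReach adj v i → (PySem.Dict.mk adj).get? i = some ns → j ∈ ns → pvReach adj v j

-- what both loops must produce: a duplicate-free list whose members are exactly the reachable nodes
def pvGood (adj : List (Int × List Int)) (v : Int) (L : List Int) : Prop :=
  L.Nodup ∧ v ∈ L ∧ (∀ x ∈ L, pvReach adj v x) ∧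
  (∀ i ∈ L, ∀ ns, (PySem.Dict.mk adj).get? i = some ns → ∀ j ∈ ns, j ∈ L)

lemma pvGet?_mem_snd {adj : List (Int × List Int)} {i : Int} {ns : List Int}
    (h : (PySem.Dict.mk adj).get? i = some ns) : ns ∈ adj.map Prod.snd := by
  induction adj with
  | nil => simp [PySem.Dict.get?] at h
  | cons p rest ih =>
    rw [show (p :: rest) = ((p.1, p.2) :: rest) by simp] at h
    rw [PySem.Dict.get?_mk_cons] at h
    by_cases hk : p.1 == i
    · simp [hk] at h; simp [← h]
    · simp [hk] at h; simp [ih h]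

lemma pvReach_mem {adj : List (Int × List Int)} {v x : Int} {L : List Int}
    (hG : pvGood adj v L) (h : pvReach adj v x) : x ∈ L := by
  induction h with
  | refl => exact hG.2.1
  | step hr hget hj ih => exact hG.2.2.2 _ ih _ hget _ hj

lemma pvGood_length_eq {adj : List (Int × List Int)} {v : Int} {L₁ L₂ : List Int}
    (h₁ : pvGood adj v L₁) (h₂ : pvGood adj v L₂) : L₁.length = L₂.length := by
  have hp : L₁.Perm L₂ := by
    rw [List.perm_ext_iff_of_nodup h₁.1 h₂.1]
    intro a
    constructor
    · intro ha; exact pvReach_mem h₂ (h₁.2.2.1 _ ha)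
    · intro ha; exact pvReach_mem h₁ (h₂.2.2.1 _ ha)
  exact hp.length_eq

-- A's inner fold (over one neighbour list ns), acting on the pair (temp, a)
lemma pvFoldA_inner (ns : List Int) : ∀ (t a : List Int), t.Nodup → (∀ x ∈ a, x ∈ t) →
    ∃ new : List Int,
      (ns.foldl (fun st j => if j ∈ st.1 then st
          else (PySem.Set.add st.1 j, PySem.Set.add st.2 j)) (t, a)).1 = t ++ new ∧
      (ns.foldl (fun st j => if j ∈ st.1 then st
          else (PySem.Set.add st.1 j, PySem.Set.add st.2 j)) (t, a)).2 = a ++ new ∧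
      (∀ x ∈ new, x ∈ ns) ∧ (t ++ new).Nodup ∧ (∀ j ∈ ns, j ∈ t ++ new) := by
  induction ns with
  | nil => intro t a ht _; exact ⟨[], by simp, by simp, by simp, by simpa using ht, by simp⟩
  | cons j ns ih =>
    intro t a ht ha
    simp only [List.foldl_cons]
    by_cases hj : j ∈ t
    · simp only [hj, if_pos]
      obtain ⟨new, h1, h2, h3, h4, h5⟩ := ih t a ht ha
      refine ⟨new, h1, h2, fun x hx => List.mem_cons_of_mem _ (h3 x hx), h4, ?_⟩
      intro j' hj'
      rcases List.mem_cons.mp hj' with rfl | hj'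
      · exact List.mem_append_left _ hj
      · exact h5 j' hj'
    · have hja : j ∉ a := fun h => hj (ha j h)
      simp only [show ((j ∈ t) = False) by simp [hj], if_false]
      rw [PySem.Set.add_of_not_mem hj, PySem.Set.add_of_not_mem hja]
      have hnd : (t ++ [j]).Nodup := by
        rw [List.nodup_append]
        refine ⟨ht, List.nodup_singleton j, ?_⟩
        intro x hx y hy
        rw [List.mem_singleton] at hy
        subst hy
        exact fun he => hj (he ▸ hx)
      have hsub : ∀ x ∈ a ++ [j], x ∈ t ++ [j] := by
        intro x hx
        rcases List.mem_append.mp hx with hx | hx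
        · exact List.mem_append_left _ (ha x hx)
        · exact List.mem_append_right _ hx
      obtain ⟨new, h1, h2, h3, h4, h5⟩ := ih (t ++ [j]) (a ++ [j]) hnd hsub
      refine ⟨j :: new, ?_, ?_, ?_, ?_, ?_⟩
      · rw [h1]; simp
      · rw [h2]; simp
      · intro x hx
        rcases List.mem_cons.mp hx with rfl | hx
        · exact List.mem_cons_self
        · exact List.mem_cons_of_mem _ (h3 x hx)
      · simpa [List.append_assoc] using h4
      · intro j' hj'
        rcases List.mem_cons.mp hj' with rfl | hj'
        · simp
        · have := h5 j' hj'; simpa [List.append_assoc] using this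

-- A's whole frontier expansion
lemma pvStepA_spec (adj : List (Int × List Int)) : ∀ (s t a : List Int),
    t.Nodup → (∀ x ∈ a, x ∈ t) →
    ∃ new : List Int,
      (s.foldl (fun st i =>
        match (PySem.Dict.mk adj).get? i with
        | none => st
        | some ns => ns.foldl (fun st j => if j ∈ st.1 then st
            else (PySem.Set.add st.1 j, PySem.Set.add st.2 j)) st) (t, a)).1 = t ++ new ∧
      (s.foldl (fun st i =>
        match (PySem.Dict.mk adj).get? i with
        | none => st
        | some ns => ns.foldl (fun st j => if j ∈ st.1 then st
            else (PySem.Set.add st.1 j, PySem.Set.add st.2 j)) st) (t, a)).2 = a ++ new ∧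
      (∀ x ∈ new, ∃ i ∈ s, ∃ ns, (PySem.Dict.mk adj).get? i = some ns ∧ x ∈ ns) ∧
      (t ++ new).Nodup ∧
      (∀ i ∈ s, ∀ ns, (PySem.Dict.mk adj).get? i = some ns → ∀ j ∈ ns, j ∈ t ++ new) := by
  intro s
  induction s with
  | nil => intro t a ht _; exact ⟨[], by simp, by simp, by simp, by simpa using ht, by simp⟩
  | cons i s ih =>
    intro t a ht ha
    simp only [List.foldl_cons]
    cases hget : (PySem.Dict.mk adj).get? i with
    | none =>
      simp only [hget]  -- iota-reduces the match on the looked-up neighbour list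
      obtain ⟨new, h1, h2, h3, h4, h5⟩ := ih t a ht ha
      refine ⟨new, h1, h2, ?_, h4, ?_⟩
      · intro x hx
        obtain ⟨i', hi', ns, hns, hxns⟩ := h3 x hx
        exact ⟨i', List.mem_cons_of_mem _ hi', ns, hns, hxns⟩
      · intro i' hi' ns hns j hj
        rcases List.mem_cons.mp hi' with rfl | hi'
        · rw [hget] at hns; cases hns
        · exact h5 i' hi' ns hns j hj
    | some ns =>
      simp only [hget]  -- iota-reduces the match on the looked-up neighbour list
      obtain ⟨new₁, hp1, hp2, hx1, hnd1, hcl1⟩ := pvFoldA_inner ns t a ht ha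
      have hpair : (ns.foldl (fun st j => if j ∈ st.1 then st
          else (PySem.Set.add st.1 j, PySem.Set.add st.2 j)) (t, a)) = (t ++ new₁, a ++ new₁) :=
        Prod.ext hp1 hp2
      rw [hpair]
      have hsub : ∀ x ∈ a ++ new₁, x ∈ t ++ new₁ := by
        intro x hx
        rcases List.mem_append.mp hx with hx | hx
        · exact List.mem_append_left _ (ha x hx)
        · exact List.mem_append_right _ hx
      obtain ⟨new₂, h1, h2, h3, h4, h5⟩ := ih (t ++ new₁) (a ++ new₁) hnd1 hsub
      refine ⟨new₁ ++ new₂, by rw [h1]; simp, by rw [h2]; simp, ?_, by simpa [List.append_assoc] using h4, ?_⟩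
      · intro x hx
        rcases List.mem_append.mp hx with hx | hx
        · exact ⟨i, List.mem_cons_self, ns, hget, hx1 x hx⟩
        · obtain ⟨i', hi', ns', hns', hxns'⟩ := h3 x hx
          exact ⟨i', List.mem_cons_of_mem _ hi', ns', hns', hxns'⟩
      · intro i' hi' ns' hns' j hj
        rcases List.mem_cons.mp hi' with rfl | hi'
        · rw [hget] at hns'; cases hns'
          have : j ∈ t ++ new₁ := hcl1 j hj
          rcases List.mem_append.mp this with h | h
          · exact List.mem_append_left _ h
          · exact List.mem_append_right _ (List.mem_append_left _ h)
        · have := h5 i' hi' ns' hns' j hj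
          simpa [List.append_assoc] using this

-- invariant of A's while loop
def pvInvA (adj : List (Int × List Int)) (v : Int) (temp s_temp : List Int) : Prop :=
  temp.Nodup ∧ v ∈ temp ∧ (∀ x ∈ temp, x ∈ pvU adj v) ∧ (∀ x ∈ temp, pvReach adj v x) ∧
  (∀ x ∈ s_temp, x ∈ temp) ∧
  (∀ i ∈ temp, i ∉ s_temp → ∀ ns, (PySem.Dict.mk adj).get? i = some ns → ∀ j ∈ ns, j ∈ temp)

lemma pvLoopA_good (adj : List (Int × List Int)) (v : Int) :
    ∀ (fuel : Nat) (temp s_temp : List Int), pvInvA adj v temp s_temp →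
    (s_temp = [] ∨ (pvU adj v).length + 1 ≤ fuel + temp.length) →
    pvGood adj v (pvLoopA adj fuel temp s_temp) := by
  intro fuel
  induction fuel with
  | zero =>
    intro temp s_temp hI hC
    rcases hC with rfl | hC
    · exact ⟨hI.1, hI.2.1, hI.2.2.2.1, fun i hi ns hns j hj =>
        hI.2.2.2.2.2 i hi (by simp) ns hns j hj⟩
    · have hle : temp.length ≤ (pvU adj v).length :=
        (hI.1.subperm (fun x hx => hI.2.2.1 x hx)).length_le
      omega
  | succ f ih =>
    intro temp s_temp hI hC
    by_cases hs : s_temp = []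
    · subst hs
      simp only [pvLoopA, List.isEmpty_nil, if_pos]
      exact ⟨hI.1, hI.2.1, hI.2.2.2.1, fun i hi ns hns j hj =>
        hI.2.2.2.2.2 i hi (by simp) ns hns j hj⟩
    · have hne : s_temp.isEmpty = false := by simpa [List.isEmpty_iff] using hs
      simp only [pvLoopA, hne, Bool.false_eq_true, if_false]
      obtain ⟨new, hp1, hp2, hprov, hnd, hcl⟩ :=
        pvStepA_spec adj s_temp temp [] hI.1 (by simp)
      have hpair : pvStepA adj temp s_temp = (temp ++ new, new) := by
        unfold pvStepA
        exact Prod.ext hp1 (by simpa using hp2)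
      rw [hpair]
      have hInv : pvInvA adj v (temp ++ new) new := by
        refine ⟨hnd, List.mem_append_left _ hI.2.1, ?_, ?_, fun x hx => List.mem_append_right _ hx, ?_⟩
        · intro x hx
          rcases List.mem_append.mp hx with hx | hx
          · exact hI.2.2.1 x hx
          · obtain ⟨i, hi, ns, hget, hxns⟩ := hprov x hx
            have hns : ns ∈ adj.map Prod.snd := pvGet?_mem_snd hget
            simp only [pvU, List.mem_cons]
            exact Or.inr (List.mem_flatten.mpr ⟨ns, hns, hxns⟩)
        · intro x hx
          rcases List.mem_append.mp hx with hx | hx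
          · exact hI.2.2.2.1 x hx
          · obtain ⟨i, hi, ns, hget, hxns⟩ := hprov x hx
            exact pvReach.step (hI.2.2.2.1 i (hI.2.2.2.2.1 i hi)) hget hxns
        · intro i hi hni ns hns j hj
          rcases List.mem_append.mp hi with hi | hi
          · by_cases his : i ∈ s_temp
            · exact hcl i his ns hns j hj
            · exact List.mem_append_left _ (hI.2.2.2.2.2 i hi his ns hns j hj)
          · exact absurd hi hni
      apply ih (temp ++ new) new hInv
      by_cases hnew : new = []
      · exact Or.inl hnew
      · right
        have h1 : 1 ≤ new.length := by
          cases new with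
          | nil => exact absurd rfl hnew
          | cons _ _ => simp
        have hC' : (pvU adj v).length + 1 ≤ f + 1 + temp.length := by
          rcases hC with h | h
          · exact absurd h hs
          · exact h
        simp only [List.length_append]
        omega

-- B's inner fold (over one neighbour list ns), acting on the pair (visited, stack)
lemma pvFoldB_inner (ns : List Int) : ∀ (vis rest : List Int), vis.Nodup →
    ∃ new : List Int,
      (ns.foldl (fun (st : PySem.Set Int × List Int) j => if j ∈ st.1 then st
          else (PySem.Set.add st.1 j, j :: st.2)) (vis, rest)).1 = vis ++ new ∧
      (ns.foldl (fun (st : PySem.Set Int × List Int) j => if j ∈ st.1 then st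
          else (PySem.Set.add st.1 j, j :: st.2)) (vis, rest)).2 = new.reverse ++ rest ∧
      (∀ x ∈ new, x ∈ ns) ∧ (vis ++ new).Nodup ∧ (∀ j ∈ ns, j ∈ vis ++ new) := by
  induction ns with
  | nil => intro vis rest ht; exact ⟨[], by simp, by simp, by simp, by simpa using ht, by simp⟩
  | cons j ns ih =>
    intro vis rest ht
    simp only [List.foldl_cons]
    by_cases hj : j ∈ vis
    · simp only [hj, if_pos]
      obtain ⟨new, h1, h2, h3, h4, h5⟩ := ih vis rest ht
      refine ⟨new, h1, h2, fun x hx => List.mem_cons_of_mem _ (h3 x hx), h4, ?_⟩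
      intro j' hj'
      rcases List.mem_cons.mp hj' with rfl | hj'
      · exact List.mem_append_left _ hj
      · exact h5 j' hj'
    · simp only [show ((j ∈ vis) = False) by simp [hj], if_false]
      rw [PySem.Set.add_of_not_mem hj]
      have hnd : (vis ++ [j]).Nodup := by
        rw [List.nodup_append]
        refine ⟨ht, List.nodup_singleton j, ?_⟩
        intro x hx y hy
        rw [List.mem_singleton] at hy
        subst hy
        exact fun he => hj (he ▸ hx)
      obtain ⟨new, h1, h2, h3, h4, h5⟩ := ih (vis ++ [j]) (j :: rest) hnd
      refine ⟨j :: new, ?_, ?_, ?_, ?_, ?_⟩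
      · rw [h1]; simp
      · rw [h2]; simp
      · intro x hx
        rcases List.mem_cons.mp hx with rfl | hx
        · exact List.mem_cons_self
        · exact List.mem_cons_of_mem _ (h3 x hx)
      · simpa [List.append_assoc] using h4
      · intro j' hj'
        rcases List.mem_cons.mp hj' with rfl | hj'
        · simp
        · have := h5 j' hj'; simpa [List.append_assoc] using this

-- invariant of B's while loop
def pvInvB (adj : List (Int × List Int)) (v : Int) (vis stack : List Int) : Prop :=
  vis.Nodup ∧ v ∈ vis ∧ (∀ x ∈ vis, x ∈ pvU adj v) ∧ (∀ x ∈ vis, pvReach adj v x) ∧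
  (∀ x ∈ stack, x ∈ vis) ∧
  (∀ i ∈ vis, i ∉ stack → ∀ ns, (PySem.Dict.mk adj).get? i = some ns → ∀ j ∈ ns, j ∈ vis)

lemma pvLoopB_good (adj : List (Int × List Int)) (v : Int) :
    ∀ (fuel : Nat) (vis stack : List Int), pvInvB adj v vis stack →
    stack.length + (pvU adj v).length + 1 ≤ fuel + vis.length →
    pvGood adj v (pvLoopB adj fuel vis stack) := by
  intro fuel
  induction fuel with
  | zero =>
    intro vis stack hI hC
    have hle : vis.length ≤ (pvU adj v).length :=
      (hI.1.subperm (fun x hx => hI.2.2.1 x hx)).length_le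
    omega
  | succ f ih =>
    intro vis stack hI hC
    cases stack with
    | nil =>
      exact ⟨hI.1, hI.2.1, hI.2.2.2.1, fun i hi ns hns j hj =>
        hI.2.2.2.2.2 i hi (by simp) ns hns j hj⟩
    | cons i rest =>
      cases hget : (PySem.Dict.mk adj).get? i with
      | none =>
        simp only [pvLoopB, hget]
        apply ih vis rest
        · refine ⟨hI.1, hI.2.1, hI.2.2.1, hI.2.2.2.1,
            fun x hx => hI.2.2.2.2.1 x (List.mem_cons_of_mem _ hx), ?_⟩
          intro i' hi' hni' ns hns j hj
          by_cases hii : i' = i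
          · subst hii; rw [hget] at hns; cases hns
          · exact hI.2.2.2.2.2 i' hi' (by simp [hii, hni']) ns hns j hj
        · simp only [List.length_cons] at hC; omega
      | some ns =>
        simp only [pvLoopB, hget]
        obtain ⟨new, hp1, hp2, hx1, hnd1, hcl1⟩ := pvFoldB_inner ns vis rest hI.1
        have hpair : (ns.foldl (fun (st : PySem.Set Int × List Int) j => if j ∈ st.1 then st
            else (PySem.Set.add st.1 j, j :: st.2)) (vis, rest)) = (vis ++ new, new.reverse ++ rest) :=
          Prod.ext hp1 hp2
        rw [hpair]
        have hiv : i ∈ vis := hI.2.2.2.2.1 i List.mem_cons_self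
        apply ih (vis ++ new) (new.reverse ++ rest)
        · refine ⟨hnd1, List.mem_append_left _ hI.2.1, ?_, ?_, ?_, ?_⟩
          · intro x hx
            rcases List.mem_append.mp hx with hx | hx
            · exact hI.2.2.1 x hx
            · have hns : ns ∈ adj.map Prod.snd := pvGet?_mem_snd hget
              simp only [pvU, List.mem_cons]
              exact Or.inr (List.mem_flatten.mpr ⟨ns, hns, hx1 x hx⟩)
          · intro x hx
            rcases List.mem_append.mp hx with hx | hx
            · exact hI.2.2.2.1 x hx
            · exact pvReach.step (hI.2.2.2.1 i hiv) hget (hx1 x hx)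
          · intro x hx
            rcases List.mem_append.mp hx with hx | hx
            · exact List.mem_append_right _ (List.mem_reverse.mp hx)
            · exact List.mem_append_left _ (hI.2.2.2.2.1 x (List.mem_cons_of_mem _ hx))
          · intro i' hi' hni' ns' hns' j hj
            have hnnew : i' ∉ new := fun h =>
              hni' (List.mem_append_left _ (List.mem_reverse.mpr h))
            have hnrest : i' ∉ rest := fun h => hni' (List.mem_append_right _ h)
            rcases List.mem_append.mp hi' with hi' | hi'
            · by_cases hii : i' = i
              · subst hii; rw [hget] at hns'; cases hns'
                exact hcl1 j hj
              · exact List.mem_append_left _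
                  (hI.2.2.2.2.2 i' hi' (by simp [hii, hnrest]) ns' hns' j hj)
            · exact absurd hi' hnnew
        · simp only [List.length_append, List.length_reverse, List.length_cons] at hC ⊢
          omega

-- ===== VERDICT (by name: the statement is the Claim_ definition above) =====
theorem R_first_v_spec : Claim_equal_R_first_v := by
  intro adj v _
  unfold Spec_R_first_v R_first_v R_first_v_alt
  have hv : PySem.Set.ofList [v] = [v] := PySem.Set.ofList_eq_self_of_nodup [v] (List.nodup_singleton v)
  rw [hv]
  have hIv : ∀ s : List Int, s = [v] →
      (∀ x ∈ [v], x ∈ pvU adj v) := by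
    intro _ _ x hx
    simp only [List.mem_singleton] at hx
    subst hx
    exact List.mem_cons_self
  have hA : pvGood adj v (pvLoopA adj (pvFuel adj v) [v] [v]) := by
    apply pvLoopA_good
    · exact ⟨by simp, by simp, hIv [v] rfl, by simp [pvReach.refl],
        by simp, fun i hi hni => absurd hi hni⟩
    · right
      simp only [pvFuel, pvU]
      omega
  have hB : pvGood adj v (pvLoopB adj (pvFuel adj v) [v] [v]) := by
    apply pvLoopB_good
    · exact ⟨by simp, by simp, hIv [v] rfl, by simp [pvReach.refl],
        by simp, fun i hi hni => absurd hi hni⟩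
    · simp only [pvFuel, pvU]
      omega
  exact congrArg (fun n : Nat => (n : Int)) (pvGood_length_eq hA hB)
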